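-- pv_equiv track=rewrite | github.com/rradz/gossip | analyze_circulants.py | generate_jump_combinations
-- ===== SOURCE A (Python) =====
-- from itertools import combinations
-- from typing import Dict, List, Tuple, Set, Any
--
-- def generate_jump_combinations(n: int, degree: int) -> List[List[int]]:
--     """Generate valid jump combinations for given n and degree."""
--     if degree % 2 != 0:
--         return []  # Degree must be even for circulant graphs
--
--     num_jumps = degree // 2
--     max_jump = n // 2
--
--     # Generate all combinations of jumps
--     possible_jumps = list(range(1, max_jump + 1))
--     if len(possible_jumps) < num_jumps:
--         return []
--
--     return [list(combo) for combo in combinations(possible_jumps, num_jumps)]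
-- ===== SOURCE B (Python) =====
-- def _unwind(chain):
--     # materialize a reversed cons-chain (head, parent) as a list in chosen order
--     combo = []
--     while chain is not None:
--         x, chain = chain
--         combo.append(x)
--     combo.reverse()
--     return combo
--
-- def generate_jump_combinations(n, degree):
--     if degree % 2 != 0:
--         return []
--     num_jumps = degree // 2
--     possible_jumps = list(range(1, n // 2 + 1))
--     total = len(possible_jumps)
--     if total < num_jumps:
--         return []
--     # depth-first include-before-skip enumeration with an explicit stack;
--     # each entry (i, k, chain): choose k jumps from possible_jumps[i:], chain = chosen prefix
--     out = []
--     stack = [(0, num_jumps, None)]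
--     pop = stack.pop
--     push = stack.append
--     while stack:
--         i, k, chain = pop()
--         if k == 0:
--             out.append(_unwind(chain))
--             continue
--         if total - i == k:  # forced: every remaining candidate must be taken
--             out.append(_unwind(chain) + possible_jumps[i:])
--             continue
--         if total - i < k:
--             continue
--         push((i + 1, k, chain))                           # skip possible_jumps[i]
--         push((i + 1, k - 1, (possible_jumps[i], chain)))  # include it (popped first)
--     return out
-- ===== Notes on version B (the rewrite author's own statement) =====
-- stated objective: alternative
-- what changed: Replaces the itertools.combinations library call with an explicit-stack depth-first include-before-skip enumerator over cons-chain prefixes (with not-enough-elements pruning and a forced-tail shortcut), emitting the same lexicographic order.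
import Mathlib
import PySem

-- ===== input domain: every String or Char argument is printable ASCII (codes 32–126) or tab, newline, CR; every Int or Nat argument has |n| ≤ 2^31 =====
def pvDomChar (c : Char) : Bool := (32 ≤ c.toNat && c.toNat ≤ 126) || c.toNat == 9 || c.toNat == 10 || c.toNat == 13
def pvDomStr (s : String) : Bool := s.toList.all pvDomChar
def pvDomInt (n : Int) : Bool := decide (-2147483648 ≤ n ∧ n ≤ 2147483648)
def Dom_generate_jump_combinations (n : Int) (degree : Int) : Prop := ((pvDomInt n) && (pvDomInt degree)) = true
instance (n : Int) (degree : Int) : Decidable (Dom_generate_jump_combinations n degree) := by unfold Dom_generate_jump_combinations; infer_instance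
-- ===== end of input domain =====

-- B replaces the itertools.combinations library call with a recursive include/skip
-- subset enumerator producing the same lexicographic order (objective: alternative).


-- ===== PORT A =====
-- itertools.combinations(pool, r) ported as the corresponding Mathlib function:
-- (List.sublistsLen r pool).reverse is exactly itertools' lexicographic output order.
def pyCombinations (pool : List Int) (r : Int) : List (List Int) :=
  (List.sublistsLen r.toNat pool).reverse

def generate_jump_combinations (n : Int) (degree : Int) : List (List Int) :=
  if PySem.Int.mod degree 2 ≠ 0 then []
  else
    let numJumps := PySem.Int.floordiv degree 2
    let maxJump := PySem.Int.floordiv n 2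
    let possibleJumps := PySem.List.pyRange 1 (maxJump + 1) 1
    if (possibleJumps.length : Int) < numJumps then []
    else pyCombinations possibleJumps numJumps

-- ===== PORT B =====
-- _unwind: the pop-and-append loop over a cons-chain followed by .reverse() is exactly
-- List.reverse of the chain (chain holds the chosen jumps most-recent first).
def pvUnwind (chain : List Int) : List Int := chain.reverse

-- the while-stack loop; a Python entry (i, k, chain) is represented by the remaining
-- suffix possible_jumps[i:] (so total - i = suffix.length, possible_jumps[i] = its head,
-- possible_jumps[i:] = the suffix itself): exact for the 0 ≤ i ≤ total the loop reaches.
def pvLoop (stack : List (List Int × Int × List Int)) (out : List (List Int)) : List (List Int) :=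
  match stack with
  | [] => out
  | (s, k, chain) :: rest =>
    if k = 0 then pvLoop rest (out ++ [pvUnwind chain])
    else if (s.length : Int) = k then pvLoop rest (out ++ [pvUnwind chain ++ s])
    else if (s.length : Int) < k then pvLoop rest out
    else
      match s with
      | [] => out   -- Python raises IndexError here (reachable only for k < 0, outside Pre_)
      | x :: s' => pvLoop ((s', k - 1, x :: chain) :: (s', k, chain) :: rest) out
  termination_by (stack.map (fun e => 3 ^ (e.1.length + 1))).sum
  decreasing_by
  · exact Nat.lt_add_of_pos_left (by positivity)
  · exact Nat.lt_add_of_pos_left (by positivity)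
  · exact Nat.lt_add_of_pos_left (by positivity)
  · simp only [List.map_cons, List.sum_cons, List.length_cons]
    set a := 3 ^ (s'.length + 1) with ha
    have h1 : 0 < a := by positivity
    have h2 : 3 ^ (s'.length + 1 + 1) = a * 3 := by rw [pow_succ]
    rw [h2]
    omega

def generate_jump_combinations_alt (n : Int) (degree : Int) : List (List Int) :=
  if PySem.Int.mod degree 2 ≠ 0 then []
  else
    let numJumps := PySem.Int.floordiv degree 2
    let possibleJumps := PySem.List.pyRange 1 (PySem.Int.floordiv n 2 + 1) 1
    if (possibleJumps.length : Int) < numJumps then []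
    else pvLoop [(possibleJumps, numJumps, [])] []

-- ===== PRECONDITION & SPEC =====
-- Pre_ excludes even negative degree, on which A raises ValueError (combinations with negative r).
def Pre_generate_jump_combinations (n : Int) (degree : Int) : Prop :=
  PySem.Int.mod degree 2 ≠ 0 ∨ 0 ≤ degree
instance (n : Int) (degree : Int) : Decidable (Pre_generate_jump_combinations n degree) := by
  unfold Pre_generate_jump_combinations; infer_instance

def pvWitness_generate_jump_combinations : Int × Int := (7, 4)


def Spec_generate_jump_combinations (n : Int) (degree : Int) (out : List (List Int)) : Prop :=
  out = generate_jump_combinations_alt n degree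
instance (n : Int) (degree : Int) (out : List (List Int)) : Decidable (Spec_generate_jump_combinations n degree out) := by
  unfold Spec_generate_jump_combinations; infer_instance

-- ===== CLAIM (what is proved, stated in full; the proofs are below) =====
def Claim_equal_generate_jump_combinations : Prop := ∀ (n : Int) (degree : Int), Dom_generate_jump_combinations n degree → Pre_generate_jump_combinations n degree → Spec_generate_jump_combinations n degree (generate_jump_combinations n degree)

-- ===== LEMMAS AND PROOFS =====

-- one stack entry (s, k, chain) contributes exactly the reverse of Mathlib's sublistsLen
-- of its suffix, each combination prefixed by the unwound chain, to the output accumulator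
theorem pvLoop_entry (s : List Int) (k : Nat) (chain : List Int)
    (rest : List (List Int × Int × List Int)) (out : List (List Int)) :
    pvLoop ((s, (k : Int), chain) :: rest) out
      = pvLoop rest (out ++ ((List.sublistsLen k s).reverse.map (fun c => chain.reverse ++ c))) := by
  induction s generalizing k chain rest out with
  | nil =>
    cases k with
    | zero => simp [pvLoop, pvUnwind]
    | succ m =>
      rw [pvLoop]
      have h0 : ((m + 1 : Nat) : Int) ≠ 0 := by exact_mod_cast Nat.succ_ne_zero m
      rw [if_neg h0, if_neg (by simp; exact fun h => h0 (by exact_mod_cast h.symm)), if_pos (by simp)]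
      simp
  | cons x s' ih =>
    cases k with
    | zero => simp [pvLoop, pvUnwind]
    | succ m =>
      rw [pvLoop]
      have h0 : ((m + 1 : Nat) : Int) ≠ 0 := by exact_mod_cast Nat.succ_ne_zero m
      rw [if_neg h0]
      by_cases heq : (((x :: s').length : Nat) : Int) = ((m + 1 : Nat) : Int)
      · rw [if_pos heq]
        have hlen : (x :: s').length = m + 1 := by exact_mod_cast heq
        rw [← hlen, List.sublistsLen_length]
        simp [pvUnwind]
      · rw [if_neg heq]
        by_cases hlt : (((x :: s').length : Nat) : Int) < ((m + 1 : Nat) : Int)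
        · rw [if_pos hlt]
          rw [List.sublistsLen_of_length_lt (by exact_mod_cast hlt)]
          simp
        · rw [if_neg hlt]
          have h1 : ((m + 1 : Nat) : Int) - 1 = (m : Int) := by push_cast; ring
          rw [h1, ih m (x :: chain) ((s', ((m + 1 : Nat) : Int), chain) :: rest) out,
            ih (m + 1) chain rest]
          simp [List.sublistsLen_succ_cons, Function.comp_def]

-- ===== VERDICT (by name: the statement is the Claim_ definition above) =====
theorem generate_jump_combinations_spec : Claim_equal_generate_jump_combinations := by
  intro n degree _ hpre
  unfold Spec_generate_jump_combinations generate_jump_combinations generate_jump_combinations_alt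
  by_cases hm : PySem.Int.mod degree 2 ≠ 0
  · rw [if_pos hm, if_pos hm]
  · rw [if_neg hm, if_neg hm]
    have hdeg : 0 ≤ degree := by
      rcases hpre with h | h
      · exact absurd h hm
      · exact h
    have hnj : 0 ≤ PySem.Int.floordiv degree 2 := by
      rw [PySem.Int.floordiv_eq_ediv_of_pos (by norm_num)]
      exact Int.ediv_nonneg hdeg (by norm_num)
    dsimp only
    set nj := PySem.Int.floordiv degree 2 with hnjdef
    set pj := PySem.List.pyRange 1 (PySem.Int.floordiv n 2 + 1) 1 with hpjdef
    by_cases hlt : (pj.length : Int) < nj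
    · rw [if_pos hlt, if_pos hlt]
    · rw [if_neg hlt, if_neg hlt]
      obtain ⟨m, hmval⟩ := Int.eq_ofNat_of_zero_le hnj
      rw [hmval, pvLoop_entry pj m [] [] []]
      simp [pvLoop, pyCombinations, Int.toNat_natCast]
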